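-- pv_equiv track=rewrite | github.com/tubus1130/CodingTest | 프로그래머스/0/181864. 문자열 바꿔서 찾기/문자열 바꿔서 찾기.py | solution
-- ===== SOURCE A (Python) =====
-- def solution(myString, pat):
--     answer = 0
--     change = ""
--     for my in myString:
--         if my == "A":
--             change += "B"
--         else:
--             change += "A"
--     if pat in change:
--         return 1
--     else:
--         return 0
-- ===== SOURCE B (Python) =====
-- def solution(myString, pat):
--     n, m = len(myString), len(pat)
--     for i in range(n - m + 1):
--         if all((pat[j] == "B") if myString[i + j] == "A" else (pat[j] == "A") for j in range(m)):
--             return 1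
--     return 0
-- ===== Notes on version B (the rewrite author's own statement) =====
-- stated objective: faster
-- what changed: B does a direct sliding-window match of pat against character classes of myString (pat[j]=='B' iff myString[i+j]=='A') instead of materialising the fully swapped copy of myString and using the substring operator; it allocates no intermediate string and stops at the first match.
import Mathlib
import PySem

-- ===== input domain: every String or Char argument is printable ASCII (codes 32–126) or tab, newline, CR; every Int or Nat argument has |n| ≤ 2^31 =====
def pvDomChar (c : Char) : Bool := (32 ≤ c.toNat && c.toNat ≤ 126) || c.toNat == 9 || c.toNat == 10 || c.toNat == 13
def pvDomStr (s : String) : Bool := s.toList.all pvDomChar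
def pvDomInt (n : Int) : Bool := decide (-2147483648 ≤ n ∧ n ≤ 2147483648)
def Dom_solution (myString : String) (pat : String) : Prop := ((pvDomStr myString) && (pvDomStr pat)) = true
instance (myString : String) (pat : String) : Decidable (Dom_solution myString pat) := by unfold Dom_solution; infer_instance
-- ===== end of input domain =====

-- B replaces A's build-a-swapped-copy-then-substring-search by a direct sliding-window
-- class match of pat against myString; same return value, no intermediate string.

-- ===== PORT A =====
-- A: build `change` by appending the swapped character for each char of myString, then `pat in change`.
def solution (myString : String) (pat : String) : Int :=
  let change := myString.toList.foldl
    (fun acc my => acc ++ [if my == 'A' then 'B' else 'A']) ([] : List Char)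
  if PySem.Chars.isIn pat.toList change then 1 else 0

-- ===== PORT B =====
-- window test at offset i: for each j, pat[j]=='B' iff myString[i+j]=='A' (indices always in range when called)
def solMatch (s p : List Char) (i : Int) : Bool :=
  (PySem.List.pyRange 0 (PySem.List.len p) 1).all (fun j =>
    if PySem.List.pyGetD s (i + j) ' ' == 'A'
    then PySem.List.pyGetD p j ' ' == 'B'
    else PySem.List.pyGetD p j ' ' == 'A')

-- the `for i in range(...): if …: return 1` loop with its final `return 0`
def solScan (s p : List Char) : List Int → Int
  | [] => 0
  | i :: rest => if solMatch s p i then 1 else solScan s p rest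

def solution_alt (myString : String) (pat : String) : Int :=
  solScan myString.toList pat.toList
    (PySem.List.pyRange 0 (PySem.List.len myString.toList - PySem.List.len pat.toList + 1) 1)

-- ===== PRECONDITION & SPEC =====
def Spec_solution (myString : String) (pat : String) (out : Int) : Prop := out = solution_alt myString pat
instance (myString : String) (pat : String) (out : Int) : Decidable (Spec_solution myString pat out) := by unfold Spec_solution; infer_instance

-- ===== CLAIM (what is proved, stated in full; the proofs are below) =====
def Claim_equal_solution : Prop := ∀ (myString : String) (pat : String), Dom_solution myString pat → Spec_solution myString pat (solution myString pat)

-- ===== LEMMAS AND PROOFS =====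

def pvSwap (c : Char) : Char := if c == 'A' then 'B' else 'A'

theorem pv_foldl_append (s : List Char) (acc : List Char) :
    s.foldl (fun a my => a ++ [if my == 'A' then 'B' else 'A']) acc = acc ++ s.map pvSwap := by
  induction s generalizing acc with
  | nil => simp
  | cons c t ih => rw [List.foldl_cons, ih]; simp [pvSwap]

theorem pv_scan_eq_one (s p : List Char) (l : List Int) :
    solScan s p l = (if ∃ i ∈ l, solMatch s p i = true then 1 else 0) := by
  induction l with
  | nil => simp [solScan]
  | cons i rest ih =>
      by_cases h : solMatch s p i = true
      · simp [solScan, h]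
      · simp [solScan, h, ih]

theorem pv_match_iff (s p : List Char) (i : Int) (h0 : 0 ≤ i)
    (hle : i.toNat + p.length ≤ s.length) :
    solMatch s p i = true ↔ p <+: (s.map pvSwap).drop i.toNat := by
  unfold solMatch
  rw [List.all_eq_true, List.prefix_iff_getElem?]
  constructor
  · intro h j hj
    have hmem : (j : Int) ∈ PySem.List.pyRange 0 (PySem.List.len p) 1 := by
      rw [PySem.List.mem_pyRange_one]
      simp [PySem.List.len]; omega
    have hc := h _ hmem
    rw [PySem.List.pyGetD_of_nonneg s _ (by omega),
        PySem.List.pyGetD_of_nonneg p _ (by omega),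
        show (i + (j:Int)).toNat = i.toNat + j by omega,
        show ((j:Int)).toNat = j by omega] at hc
    have hlt : i.toNat + j < s.length := by omega
    rw [List.getD_eq_getElem s ' ' hlt, List.getD_eq_getElem p ' ' hj] at hc
    rw [List.getElem?_drop]
    rw [show (s.map pvSwap)[i.toNat + j]? = some (pvSwap s[i.toNat + j]) by simp [hlt]]
    by_cases hA : s[i.toNat + j] = 'A'
    · simp [hA] at hc; simp [pvSwap, hA, hc]
    · simp [hA] at hc; simp [pvSwap, hA, hc]
  · intro h j hmem
    rw [PySem.List.mem_pyRange_one] at hmem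
    obtain ⟨hj0, hjm⟩ := hmem
    simp only [PySem.List.len] at hjm
    have hjlt : j.toNat < p.length := by omega
    have hc := h j.toNat hjlt
    rw [List.getElem?_drop] at hc
    have hlt : i.toNat + j.toNat < s.length := by omega
    rw [show (s.map pvSwap)[i.toNat + j.toNat]? = some (pvSwap s[i.toNat + j.toNat]) by simp [hlt]] at hc
    have hps : p[j.toNat] = pvSwap s[i.toNat + j.toNat] := by
      injection hc with hc'; exact hc'.symm
    rw [PySem.List.pyGetD_of_nonneg s _ (by omega),
        PySem.List.pyGetD_of_nonneg p _ hj0,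
        show (i + j).toNat = i.toNat + j.toNat by omega,
        List.getD_eq_getElem s ' ' hlt, List.getD_eq_getElem p ' ' hjlt, hps]
    by_cases hA : s[i.toNat + j.toNat] = 'A'
    · simp [pvSwap, hA]
    · simp [pvSwap, hA]

theorem pv_exists_iff (s p : List Char) :
    (∃ j, p <+: (s.map pvSwap).drop j) ↔
    ∃ i ∈ PySem.List.pyRange 0 ((s.length : Int) - (p.length : Int) + 1) 1,
      solMatch s p i = true := by
  constructor
  · rintro ⟨j, hj⟩
    by_cases hjn : j ≤ s.length
    · have hlen := hj.length_le
      rw [List.length_drop, List.length_map] at hlen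
      refine ⟨(j : Int), ?_, ?_⟩
      · rw [PySem.List.mem_pyRange_one]; omega
      · rw [pv_match_iff s p _ (by omega) (by omega),
          show ((j:Int)).toNat = j by omega]
        exact hj
    · have hnil : (s.map pvSwap).drop j = [] :=
        List.drop_eq_nil_of_le (by simp; omega)
      rw [hnil] at hj
      have hp : p = [] := List.prefix_nil.mp hj
      refine ⟨0, ?_, ?_⟩
      · rw [PySem.List.mem_pyRange_one]
        constructor
        · omega
        · simp only [hp, List.length_nil]; omega
      · rw [pv_match_iff s p 0 le_rfl (by simp [hp])]
        simp [hp]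
  · rintro ⟨i, hmem, hmatch⟩
    rw [PySem.List.mem_pyRange_one] at hmem
    have h0 : 0 ≤ i := hmem.1
    have hle : i.toNat + p.length ≤ s.length := by omega
    exact ⟨i.toNat, (pv_match_iff s p i h0 hle).mp hmatch⟩

-- ===== VERDICT =====
theorem solution_spec : Claim_equal_solution := by
  intro myString pat _
  unfold Spec_solution solution solution_alt
  rw [pv_foldl_append, List.nil_append, pv_scan_eq_one]
  have hiff : PySem.Chars.isIn pat.toList (myString.toList.map pvSwap) = true ↔
      ∃ i ∈ PySem.List.pyRange 0 (PySem.List.len myString.toList - PySem.List.len pat.toList + 1) 1,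
        solMatch myString.toList pat.toList i = true := by
    rw [← PySem.Chars.exists_prefix_drop_iff_isIn]
    simp only [PySem.List.len]
    exact pv_exists_iff myString.toList pat.toList
  by_cases hin : PySem.Chars.isIn pat.toList (myString.toList.map pvSwap) = true
  · rw [if_pos hin, if_pos (hiff.mp hin)]
  · rw [if_neg hin, if_neg (fun hex => hin (hiff.mpr hex))]
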